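-- pv_equiv track=rewrite | github.com/ghuyng/advent-of-code-2025 | day9.py | is_bound
-- ===== SOURCE A (Python) =====
-- def is_bound(x, y, linex, liney):
--     left, right, upper, lower = False, False, False, False
--     for boundx in linex:
--         found = False
--         for l, r in linex[boundx]:
--             if l <= y <= r:
--                 found = True
--                 break
--         if found:
--             if boundx < x:
--                 left = True
--             elif boundx > x:
--                 right = True
--             else:
--                 left = right = True
--
--     if not left or not right:
--         return False
--
--     for boundy in liney:
--         found = False
--         for l, r in liney[boundy]:
--             if l <= x <= r:
--                 found = True
--                 break
--         if found:
--             if boundy < y: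
--                 lower = True
--             elif boundy > y:
--                 upper = True
--             else:
--                 lower = upper = True
--     if not lower or not upper:
--         return False
--     return True
-- ===== SOURCE B (Python) =====
-- def is_bound(x, y, linex, liney):
--     def axis_ok(d, q, v):
--         keys = sorted(d)
--         lo = None
--         for k in keys:
--             for l, r in d[k]:
--                 if l <= v <= r:
--                     lo = k
--                     break
--             if lo is not None:
--                 break
--         if lo is None or lo > q:
--             return False
--         hi = None
--         for k in reversed(keys):
--             for l, r in d[k]:
--                 if l <= v <= r:
--                     hi = k
--                     break
--             if hi is not None:
--                 break
--         return hi is not None and hi >= q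
--     return axis_ok(linex, x, y) and axis_ok(liney, y, x)
-- ===== Notes on version B (the rewrite author's own statement) =====
-- stated objective: alternative
-- what changed: Sort-then-scan instead of a flag-accumulating pass: per axis the keys are sorted and two short-circuiting scans (forward and backward) find the smallest and largest covering boundary, which are compared with the query coordinate; A instead threads four booleans through per-key comparison branches in one unordered pass.
import Mathlib
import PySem

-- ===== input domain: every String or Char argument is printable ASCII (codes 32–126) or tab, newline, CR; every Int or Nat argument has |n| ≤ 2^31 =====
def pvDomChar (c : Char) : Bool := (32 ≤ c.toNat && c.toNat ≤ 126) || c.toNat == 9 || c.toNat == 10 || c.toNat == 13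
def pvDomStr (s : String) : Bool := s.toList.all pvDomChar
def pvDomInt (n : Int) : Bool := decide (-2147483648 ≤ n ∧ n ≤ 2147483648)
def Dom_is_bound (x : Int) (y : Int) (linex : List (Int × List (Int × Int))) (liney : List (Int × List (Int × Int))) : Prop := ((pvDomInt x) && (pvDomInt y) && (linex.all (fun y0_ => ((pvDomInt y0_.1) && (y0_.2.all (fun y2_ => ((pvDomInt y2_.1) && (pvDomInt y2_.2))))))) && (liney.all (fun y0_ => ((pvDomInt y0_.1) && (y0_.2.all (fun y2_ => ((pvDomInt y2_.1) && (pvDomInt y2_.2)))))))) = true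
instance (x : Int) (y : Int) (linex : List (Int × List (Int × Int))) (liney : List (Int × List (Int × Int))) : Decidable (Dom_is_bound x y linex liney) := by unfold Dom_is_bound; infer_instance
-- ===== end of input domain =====

-- B uses a different strategy: per axis it sorts the boundary keys and runs two short-circuiting
-- scans (forward and backward) for the first covering key, comparing those extremes with the query,
-- instead of A's single unordered pass threading four boolean flags through comparison branches.

-- ===== PORT A =====
-- shared dict primitive: `any(l <= v <= r for l, r in d[k])` (first-match lookup, as on a Python dict)
def pvFound (d : List (Int × List (Int × Int))) (v : Int) (k : Int) : Bool :=
  ((PySem.Dict.mk d).getD k []).any (fun p => decide (p.1 ≤ v) && decide (v ≤ p.2))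

def is_bound (x : Int) (y : Int) (linex : List (Int × List (Int × Int))) (liney : List (Int × List (Int × Int))) : Bool :=
  let lr := (linex.map Prod.fst).foldl
    (fun (lr : Bool × Bool) bx =>
      if pvFound linex y bx then
        if bx < x then (true, lr.2)
        else if bx > x then (lr.1, true)
        else (true, true)
      else lr) (false, false)
  if !lr.1 || !lr.2 then false
  else
    let lu := (liney.map Prod.fst).foldl
      (fun (lu : Bool × Bool) by_ =>
        if pvFound liney x by_ then
          if by_ < y then (true, lu.2)
          else if by_ > y then (lu.1, true)
          else (true, true)
        else lu) (false, false)
    if !lu.1 || !lu.2 then false else true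

-- ===== PORT B =====
-- axis_ok(d, q, v): sort the keys; first covering key forward (lo), first covering key backward (hi)
def pvAxisOk (d : List (Int × List (Int × Int))) (q : Int) (v : Int) : Bool :=
  let keys := PySem.List.sorted (d.map Prod.fst) (fun k => k) false
  match keys.find? (pvFound d v) with
  | none => false            -- lo is None
  | some lo =>
    if lo > q then false
    else
      match keys.reverse.find? (pvFound d v) with
      | none => false        -- hi is None
      | some hi => decide (hi ≥ q)

def is_bound_alt (x : Int) (y : Int) (linex : List (Int × List (Int × Int))) (liney : List (Int × List (Int × Int))) : Bool :=
  pvAxisOk linex x y && pvAxisOk liney y x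

-- ===== PRECONDITION & SPEC =====
def Spec_is_bound (x : Int) (y : Int) (linex : List (Int × List (Int × Int))) (liney : List (Int × List (Int × Int))) (out : Bool) : Prop := out = is_bound_alt x y linex liney
instance (x : Int) (y : Int) (linex : List (Int × List (Int × Int))) (liney : List (Int × List (Int × Int))) (out : Bool) : Decidable (Spec_is_bound x y linex liney out) := by unfold Spec_is_bound; infer_instance

-- ===== CLAIM (what is proved, stated in full; the proofs are below) =====
def Claim_equal_is_bound : Prop := ∀ (x : Int) (y : Int) (linex : List (Int × List (Int × Int))) (liney : List (Int × List (Int × Int))), Dom_is_bound x y linex liney → Spec_is_bound x y linex liney (is_bound x y linex liney)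

-- ===== LEMMAS AND PROOFS =====

-- A's flag loop computes "∃ covering key ≤ x" and "∃ covering key ≥ x"
lemma foldl_flags (keys : List Int) (p : Int → Bool) (x : Int) (a b : Bool) :
    keys.foldl
      (fun (lr : Bool × Bool) k =>
        if p k then
          if k < x then (true, lr.2)
          else if k > x then (lr.1, true)
          else (true, true)
        else lr) (a, b)
    = (a || keys.any (fun k => p k && decide (k ≤ x)),
       b || keys.any (fun k => p k && decide (x ≤ k))) := by
  induction keys generalizing a b with
  | nil => simp
  | cons h t ih =>
    simp only [List.foldl_cons, List.any_cons]
    by_cases hp : p h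
    · by_cases h1 : h < x
      · rw [if_pos hp, if_pos h1, ih]
        simp [hp, show h ≤ x from le_of_lt h1, show ¬ x ≤ h by omega]
      · by_cases h2 : h > x
        · rw [if_pos hp, if_neg h1, if_pos h2, ih]
          simp [hp, show x ≤ h from le_of_lt h2, show ¬ h ≤ x by omega]
        · have hx : h = x := by omega
          rw [if_pos hp, if_neg h1, if_neg h2, ih]
          subst hx
          simp [hp]
    · rw [if_neg hp, ih]
      simp [hp]

-- on a ≤-sorted list, "first match is ≤ q" = "some match is ≤ q"
lemma find_first_le (keys : List Int) (p : Int → Bool) (q : Int)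
    (hs : keys.Pairwise (fun a b => a ≤ b)) :
    (match keys.find? p with | none => false | some k => decide (k ≤ q))
    = keys.any (fun k => p k && decide (k ≤ q)) := by
  induction keys with
  | nil => simp
  | cons h t ih =>
    rcases List.pairwise_cons.mp hs with ⟨hle, ht⟩
    by_cases hp : p h
    · simp only [List.find?_cons, hp, List.any_cons, Bool.true_and]
      by_cases hq : h ≤ q
      · simp [hq]
      · have hz : t.any (fun k => p k && decide (k ≤ q)) = false := by
          rw [List.any_eq_false]; intro k hk
          have := hle k hk; simp; omega
        simp [hq, hz]
    · simp only [List.find?_cons, hp, List.any_cons, Bool.false_and,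
        Bool.false_or]
      exact ih ht

-- on a ≥-sorted list, "first match is ≥ q" = "some match is ≥ q"
lemma find_first_ge (keys : List Int) (p : Int → Bool) (q : Int)
    (hs : keys.Pairwise (fun a b => b ≤ a)) :
    (match keys.find? p with | none => false | some k => decide (q ≤ k))
    = keys.any (fun k => p k && decide (q ≤ k)) := by
  induction keys with
  | nil => simp
  | cons h t ih =>
    rcases List.pairwise_cons.mp hs with ⟨hge, ht⟩
    by_cases hp : p h
    · simp only [List.find?_cons, hp, List.any_cons, Bool.true_and]
      by_cases hq : q ≤ h
      · simp [hq]
      · have hz : t.any (fun k => p k && decide (q ≤ k)) = false := by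
          rw [List.any_eq_false]; intro k hk
          have := hge k hk; simp; omega
        simp [hq, hz]
    · simp only [List.find?_cons, hp, List.any_cons, Bool.false_and,
        Bool.false_or]
      exact ih ht

lemma any_perm (l₁ l₂ : List Int) (h : l₁.Perm l₂) (p : Int → Bool) :
    l₁.any p = l₂.any p := by
  cases h1 : l₁.any p <;> cases h2 : l₂.any p <;> try rfl
  · rw [List.any_eq_false] at h1; rw [List.any_eq_true] at h2
    obtain ⟨k, hk, hpk⟩ := h2
    exact absurd hpk (by simp [h1 k (h.mem_iff.mpr hk)])
  · rw [List.any_eq_true] at h1; rw [List.any_eq_false] at h2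
    obtain ⟨k, hk, hpk⟩ := h1
    exact absurd hpk (by simp [h2 k (h.mem_iff.mp hk)])

-- the two-sided scan splits into two independent one-sided checks
lemma axis_split (keys : List Int) (p : Int → Bool) (q : Int) :
    (match keys.find? p with
     | none => false
     | some lo =>
       if lo > q then false
       else match keys.reverse.find? p with
            | none => false
            | some hi => decide (hi ≥ q))
    = ((match keys.find? p with | none => false | some k => decide (k ≤ q))
       && (match keys.reverse.find? p with | none => false | some k => decide (q ≤ k))) := by
  rcases hf : keys.find? p with _ | lo
  · simp
  · simp only
    by_cases hlo : lo > q
    · have : decide (lo ≤ q) = false := by simp; omega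
      simp [hlo, this]
    · have : decide (lo ≤ q) = true := by simp; omega
      simp [hlo, this, ge_iff_le]

-- B's sorted two-sided scan computes the same pair of existentials as A's flag pass
lemma axis_eq (d : List (Int × List (Int × Int))) (q v : Int) :
    pvAxisOk d q v
    = ((d.map Prod.fst).any (fun k => pvFound d v k && decide (k ≤ q))
       && (d.map Prod.fst).any (fun k => pvFound d v k && decide (q ≤ k))) := by
  have hpair : (PySem.List.sorted (d.map Prod.fst) (fun k : Int => k) false).Pairwise
      (fun a b => a ≤ b) := PySem.List.sorted_pairwise _ _
  have hperm : (PySem.List.sorted (d.map Prod.fst) (fun k : Int => k) false).Perm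
      (d.map Prod.fst) := PySem.List.sorted_perm _ _ _
  have e0 : pvAxisOk d q v
      = (match (PySem.List.sorted (d.map Prod.fst) (fun k : Int => k) false).find? (pvFound d v) with
         | none => false
         | some lo =>
           if lo > q then false
           else match (PySem.List.sorted (d.map Prod.fst) (fun k : Int => k) false).reverse.find? (pvFound d v) with
                | none => false
                | some hi => decide (hi ≥ q)) := rfl
  rw [e0, axis_split,
      find_first_le _ (pvFound d v) q hpair,
      find_first_ge _ (pvFound d v) q (by rw [List.pairwise_reverse]; exact hpair),
      any_perm _ _ hperm, any_perm _ _ ((List.reverse_perm _).trans hperm)]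

lemma is_bound_eq (x y : Int) (linex liney : List (Int × List (Int × Int))) :
    is_bound x y linex liney = is_bound_alt x y linex liney := by
  unfold is_bound is_bound_alt
  rw [foldl_flags, foldl_flags, axis_eq, axis_eq]
  simp only [Bool.false_or]
  cases (linex.map Prod.fst).any (fun k => pvFound linex y k && decide (k ≤ x)) <;>
  cases (linex.map Prod.fst).any (fun k => pvFound linex y k && decide (x ≤ k)) <;>
  cases (liney.map Prod.fst).any (fun k => pvFound liney x k && decide (k ≤ y)) <;>
  cases (liney.map Prod.fst).any (fun k => pvFound liney x k && decide (y ≤ k)) <;>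
  simp

-- ===== VERDICT (by name: the statement is the Claim_ definition above) =====
theorem is_bound_spec : Claim_equal_is_bound := by
  intro x y linex liney _
  unfold Spec_is_bound
  exact is_bound_eq x y linex liney
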